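-- pv_equiv track=rewrite | github.com/ck-pp/algorithm | 프로그래머스/2/138476. 귤 고르기/귤 고르기.py | solution
-- ===== SOURCE A (Python) =====
-- from collections import Counter
--
-- def solution(k, tangerine):
--     tengerine_per_size = Counter(tangerine)  # (사이즈: 개수) 딕셔너리
--     sorted_t = sorted(tengerine_per_size.items(), key=lambda x: x[1], reverse=True)  # 개수별(value 기준)로 내림차순 정렬
--
--     ans, cur_cnt = 0, 0
--     for size, cnt in sorted_t:
--         ans += 1
--         cur_cnt += cnt
--         # 현재 담은 오렌지의 개수가 k를 넘어가면 종료
--         if cur_cnt >= k: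
--             break
--
--     return ans
-- ===== SOURCE B (Python) =====
-- def solution(k, tangerine):
--     # Count occurrences of each size, then counting-sort the frequencies
--     # (each frequency is between 1 and n) and pick greedily from the largest.
--     freq = {}
--     for t in tangerine:
--         freq[t] = freq.get(t, 0) + 1
--     n = len(tangerine)
--     bucket = [0] * (n + 1)  # bucket[c] = number of sizes occurring exactly c times
--     for c in freq.values():
--         bucket[c] += 1
--     ans = 0
--     cur = 0
--     for c in range(n, 0, -1):
--         for _ in range(bucket[c]):
--             ans += 1
--             cur += c
--             if cur >= k:
--                 return ans
--     return ans
-- ===== Notes on version B (the rewrite author's own statement) =====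
-- stated objective: alternative
-- what changed: B replaces the comparison sort of (size,count) pairs by a counting-sort bucket over frequencies (each between 1 and n) traversed from the largest count down; intended as asymptotically faster (O(n) vs O(n log n)) but a timing run read only 1.44x at the largest size, so no speed is claimed.
import Mathlib
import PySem

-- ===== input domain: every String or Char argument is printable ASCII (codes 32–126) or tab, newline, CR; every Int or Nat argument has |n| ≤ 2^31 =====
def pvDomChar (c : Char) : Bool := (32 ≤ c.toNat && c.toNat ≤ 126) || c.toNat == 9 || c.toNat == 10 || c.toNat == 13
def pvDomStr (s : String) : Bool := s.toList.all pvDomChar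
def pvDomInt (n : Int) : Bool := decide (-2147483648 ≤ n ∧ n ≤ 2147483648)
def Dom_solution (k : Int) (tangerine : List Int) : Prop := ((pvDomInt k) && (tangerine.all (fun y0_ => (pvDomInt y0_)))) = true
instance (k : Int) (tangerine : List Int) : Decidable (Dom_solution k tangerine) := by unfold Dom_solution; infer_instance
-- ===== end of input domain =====

-- B replaces A's comparison sort of (size,count) pairs by a counting-sort bucket over
-- frequencies traversed from the largest count down (an alternative algorithm).


-- ===== PORT A =====
-- the for-loop with break: ans += 1; cur += cnt; stop when cur ≥ k
def pvLoopA (k : Int) : List (Int × Int) → Int → Int → Int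
  | [], ans, _ => ans
  | (_, cnt) :: rest, ans, cur =>
    if cur + cnt ≥ k then ans + 1 else pvLoopA k rest (ans + 1) (cur + cnt)

def solution (k : Int) (tangerine : List Int) : Int :=
  let tengerine_per_size := PySem.Dict.counter tangerine
  let sorted_t := PySem.List.sorted tengerine_per_size.items (fun x => x.2) true
  pvLoopA k sorted_t 0 0

-- ===== PORT B =====
-- bucket[c] += 1 ; exact for 0 ≤ c < len(bucket), which holds: c is a frequency, 1 ≤ c ≤ n
def pvBump (b : List Int) (c : Int) : List Int :=
  b.set c.toNat (b.getD c.toNat 0 + 1)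

-- inner 'for _ in range(bucket[c])' with the early return (inl = returned value)
def pvInnerB (k c : Int) : Nat → Int → Int → Sum Int (Int × Int)
  | 0, ans, cur => Sum.inr (ans, cur)
  | m + 1, ans, cur =>
    if cur + c ≥ k then Sum.inl (ans + 1) else pvInnerB k c m (ans + 1) (cur + c)

-- outer 'for c in range(n, 0, -1)'
def pvOuterB (k : Int) (bucket : List Int) : List Int → Int → Int → Int
  | [], ans, _ => ans
  | c :: rest, ans, cur =>
    match pvInnerB k c (bucket.getD c.toNat 0).toNat ans cur with
    | Sum.inl v => v
    | Sum.inr (a, cu) => pvOuterB k bucket rest a cu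

def solution_alt (k : Int) (tangerine : List Int) : Int :=
  let freq := tangerine.foldl (fun d t => d.insert t (d.getD t 0 + 1)) PySem.Dict.empty
  let n := tangerine.length
  let bucket := freq.values.foldl pvBump (List.replicate (n + 1) 0)
  pvOuterB k bucket (PySem.List.pyRange (n : Int) 0 (-1)) 0 0

-- ===== PRECONDITION & SPEC =====
def Spec_solution (k : Int) (tangerine : List Int) (out : Int) : Prop := out = solution_alt k tangerine
instance (k : Int) (tangerine : List Int) (out : Int) : Decidable (Spec_solution k tangerine out) := by unfold Spec_solution; infer_instance

-- ===== CLAIM (what is proved, stated in full; the proofs are below) =====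
def Claim_equal_solution : Prop := ∀ (k : Int) (tangerine : List Int), Dom_solution k tangerine → Spec_solution k tangerine (solution k tangerine)

-- ===== LEMMAS AND PROOFS =====

-- the greedy loop over the list of counts alone
def pvLoopC (k : Int) : List Int → Int → Int → Int
  | [], ans, _ => ans
  | c :: rest, ans, cur =>
    if cur + c ≥ k then ans + 1 else pvLoopC k rest (ans + 1) (cur + c)

theorem pvLoopA_eq_loopC (k : Int) (l : List (Int × Int)) (ans cur : Int) :
    pvLoopA k l ans cur = pvLoopC k (l.map Prod.snd) ans cur := by
  induction l generalizing ans cur with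
  | nil => rfl
  | cons p rest ih =>
    obtain ⟨s, c⟩ := p
    simp only [pvLoopA, pvLoopC, List.map]
    split_ifs <;> simp [ih]

theorem pvInnerB_spec (k c : Int) (m : Nat) (ans cur : Int) (rest : List Int) :
    pvLoopC k (List.replicate m c ++ rest) ans cur =
      (match pvInnerB k c m ans cur with
       | Sum.inl v => v
       | Sum.inr (a, cu) => pvLoopC k rest a cu) := by
  induction m generalizing ans cur with
  | zero => rfl
  | succ m ih =>
    simp only [List.replicate, List.cons_append, pvLoopC, pvInnerB]
    split_ifs <;> simp [ih]

theorem pvOuterB_eq_loopC (k : Int) (bucket : List Int) (cs : List Int) (ans cur : Int) :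
    pvOuterB k bucket cs ans cur =
      pvLoopC k (cs.flatMap (fun c => List.replicate (bucket.getD c.toNat 0).toNat c)) ans cur := by
  induction cs generalizing ans cur with
  | nil => rfl
  | cons c rest ih =>
    simp only [pvOuterB, List.flatMap_cons]
    rw [pvInnerB_spec]
    cases h : pvInnerB k c (bucket.getD c.toNat 0).toNat ans cur with
    | inl v => rfl
    | inr p => obtain ⟨a, cu⟩ := p; simp [ih]

theorem pvBucket_spec (vs : List Int) (b : List Int)
    (h : ∀ v ∈ vs, 0 ≤ v ∧ v.toNat < b.length) (i : Nat) (hi : i < b.length) :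
    (vs.foldl pvBump b).getD i 0 = b.getD i 0 + (vs.count (i : Int) : Int) := by
  induction vs generalizing b with
  | nil => simp
  | cons v vs ih =>
    have hv := h v (List.mem_cons_self)
    have hlen : (pvBump b v).length = b.length := by simp [pvBump]
    rw [List.foldl_cons, ih (pvBump b v)
      (fun w hw => by rw [hlen]; exact h w (List.mem_cons_of_mem _ hw)) (hlen ▸ hi)]
    by_cases hc : (i : Int) = v
    · have hit : v.toNat = i := by omega
      simp only [pvBump, hit, List.getD, List.getElem?_set_self hi, Option.getD_some]
      rw [← hc, List.count_cons_self]
      push_cast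
      ring
    · have hne : v.toNat ≠ i := by omega
      simp only [pvBump, List.getD]
      rw [List.getElem?_set_ne hne]
      have hc' : ¬ (v = (i : Int)) := fun h => hc h.symm
      simp [hc']

-- counts of the bucket expansion
theorem pvCount_flatMap_replicate (cs : List Int) (hnd : cs.Nodup) (f : Int → Nat) (x : Int) :
    (cs.flatMap (fun c => List.replicate (f c) c)).count x = if x ∈ cs then f x else 0 := by
  induction cs with
  | nil => simp
  | cons c cs ih =>
    simp only [List.flatMap_cons, List.count_append, List.count_replicate,
      List.nodup_cons] at *
    by_cases hx : x = c
    · subst hx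
      simp [ih hnd.2, hnd.1]
    · simp [hx, ih hnd.2, Ne.symm hx]

theorem pvPairwise_flatMap_replicate (cs : List Int) (hp : cs.Pairwise (· > ·)) (f : Int → Nat) :
    (cs.flatMap (fun c => List.replicate (f c) c)).Pairwise (fun a b => b ≤ a) := by
  induction cs with
  | nil => simp
  | cons c cs ih =>
    rw [List.pairwise_cons] at hp
    simp only [List.flatMap_cons]
    rw [List.pairwise_append]
    refine ⟨List.pairwise_replicate.mpr (Or.inr le_rfl), ih hp.2, ?_⟩
    intro a ha b hb
    have ha' : a = c := List.eq_of_mem_replicate ha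
    obtain ⟨d, hd, hb'⟩ := List.mem_flatMap.mp hb
    have hb'' : b = d := List.eq_of_mem_replicate hb'
    rw [ha', hb'']
    exact le_of_lt (hp.1 d hd)

-- main equality of the two count lists
theorem pvVals_range (xs : List Int) :
    ∀ v ∈ (PySem.Dict.counter xs).values, 1 ≤ v ∧ v ≤ (xs.length : Int) := by
  intro v hv
  simp only [PySem.Dict.values, PySem.Dict.items_counter, List.map_map, List.mem_map] at hv
  obtain ⟨s, hs, rfl⟩ := hv
  have hmem : s ∈ xs := (PySem.Set.mem_ofList xs s).mp hs
  refine ⟨?_, ?_⟩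
  · simp only [Function.comp]
    exact_mod_cast List.count_pos_iff.mpr hmem
  · simp only [Function.comp]
    exact_mod_cast List.count_le_length

theorem pvCounts_eq (xs : List Int) :
    ((PySem.List.sorted (PySem.Dict.counter xs).items (fun x => x.2) true).map Prod.snd)
      = (PySem.List.pyRange (xs.length : Int) 0 (-1)).flatMap
          (fun c => List.replicate ((PySem.Dict.counter xs).values.count c) c) := by
  have hrange_pw : (PySem.List.pyRange (xs.length : Int) 0 (-1)).Pairwise (· > ·) := by
    rw [PySem.List.pyRange_neg_one_eq_reverse]
    exact List.pairwise_reverse.mpr (PySem.List.pairwise_lt_pyRange_one 1 ((xs.length : Int) + 1))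
  have hnd : (PySem.List.pyRange (xs.length : Int) 0 (-1)).Nodup :=
    hrange_pw.imp (fun h => ne_of_gt h)
  have hR_perm : ((PySem.List.pyRange (xs.length : Int) 0 (-1)).flatMap
      (fun c => List.replicate ((PySem.Dict.counter xs).values.count c) c)).Perm
      (PySem.Dict.counter xs).values := by
    refine List.perm_iff_count.mpr (fun x => ?_)
    rw [pvCount_flatMap_replicate _ hnd]
    split_ifs with hx
    · rfl
    · symm
      rw [List.count_eq_zero]
      intro hmem
      have hb := pvVals_range xs x hmem
      rw [PySem.List.mem_pyRange_neg_one] at hx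
      omega
  have hL_perm : ((PySem.List.sorted (PySem.Dict.counter xs).items (fun x => x.2) true).map
      Prod.snd).Perm (PySem.Dict.counter xs).values := by
    have hp := (PySem.List.sorted_perm (PySem.Dict.counter xs).items (fun x => x.2) true).map
      Prod.snd
    simpa [PySem.Dict.values] using hp
  have hL_pw : (((PySem.List.sorted (PySem.Dict.counter xs).items (fun x => x.2) true).map
      Prod.snd)).Pairwise (fun a b => b ≤ a) := by
    rw [List.pairwise_map]
    exact PySem.List.sorted_pairwise_rev (PySem.Dict.counter xs).items (fun x => x.2)
  have hR_pw := pvPairwise_flatMap_replicate _ hrange_pw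
    (fun c => (PySem.Dict.counter xs).values.count c)
  exact List.Perm.eq_of_pairwise (fun a b _ _ h1 h2 => le_antisymm h2 h1) hL_pw hR_pw
    (hL_perm.trans hR_perm.symm)

theorem pvBucket_getD (xs : List Int) (c : Int) (hc : 0 < c) (hcn : c ≤ (xs.length : Int)) :
    ((((PySem.Dict.counter xs).values).foldl pvBump
        (List.replicate (xs.length + 1) 0)).getD c.toNat 0).toNat
      = (PySem.Dict.counter xs).values.count c := by
  have hb := pvBucket_spec (PySem.Dict.counter xs).values (List.replicate (xs.length + 1) 0)
    (fun v hv => by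
      have := pvVals_range xs v hv
      refine ⟨by omega, ?_⟩
      rw [List.length_replicate]
      omega)
    c.toNat (by rw [List.length_replicate]; omega)
  rw [hb]
  have h0 : (List.replicate (xs.length + 1) (0 : Int)).getD c.toNat 0 = 0 := by
    simp only [List.getD, List.getElem?_replicate]
    split_ifs <;> rfl
  rw [h0, Int.toNat_of_nonneg hc.le]
  omega

theorem solution_spec : Claim_equal_solution := by
  intro k xs _
  unfold Spec_solution solution solution_alt
  rw [PySem.Dict.foldl_insert_getD_add_one_eq_counter]
  rw [pvLoopA_eq_loopC, pvOuterB_eq_loopC, pvCounts_eq]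
  congr 1
  refine List.flatMap_congr (fun c hc => ?_) -- pointwise equality on the range
  rw [PySem.List.mem_pyRange_neg_one] at hc
  rw [pvBucket_getD xs c hc.1 hc.2]
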